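-- pv_equiv track=rewrite | github.com/jaydholu/temp-mrj | backend/app/utils/validators.py | _validate_isbn13
-- ===== SOURCE A (Python) =====
-- def _validate_isbn13(isbn: str) -> bool:
--     """Validate ISBN-13"""
--     try:
--         check_sum = 0
--         for i, char in enumerate(isbn[:-1]):
--             multiplier = 1 if i % 2 == 0 else 3
--             check_sum += int(char) * multiplier
--
--         check_digit = int(isbn[-1])
--         return (check_sum + check_digit) % 10 == 0
--     except (ValueError, IndexError):
--         return False
-- ===== SOURCE B (Python) =====
-- def _validate_isbn13(isbn: str) -> bool:
--     """Validate ISBN-13 (grouped-slice reformulation)"""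
--     try:
--         body = isbn[:-1]
--         total = sum(int(c) for c in body[0::2]) \
--               + 3 * sum(int(c) for c in body[1::2]) \
--               + int(isbn[-1])
--         return total % 10 == 0
--     except (ValueError, IndexError):
--         return False
-- ===== Notes on version B (the rewrite author's own statement) =====
-- stated objective: alternative
-- what changed: A's single loop over enumerate(isbn[:-1]) with a per-index i%2 multiplier branch is replaced by two grouped slice summations: sum over body[0::2] (weight 1) plus 3 * sum over body[1::2], plus int(isbn[-1]), all under the same try/except.
import Mathlib
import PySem

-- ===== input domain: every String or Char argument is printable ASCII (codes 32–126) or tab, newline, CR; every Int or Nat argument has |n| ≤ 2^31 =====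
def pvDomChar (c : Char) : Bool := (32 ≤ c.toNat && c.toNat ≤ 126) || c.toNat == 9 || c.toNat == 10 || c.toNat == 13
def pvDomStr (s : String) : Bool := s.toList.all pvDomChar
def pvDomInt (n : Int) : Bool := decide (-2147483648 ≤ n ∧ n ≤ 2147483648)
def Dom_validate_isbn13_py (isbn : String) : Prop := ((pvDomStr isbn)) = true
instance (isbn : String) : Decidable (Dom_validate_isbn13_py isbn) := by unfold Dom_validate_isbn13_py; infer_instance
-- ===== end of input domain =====

-- B replaces A's per-index parity branch by two grouped slice sums (body[0::2] weight 1,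
-- body[1::2] weight 3, last digit weight 1); objective: alternative decomposition, same cost.

-- ===== PORT A =====
-- A's loop `for i, char in enumerate(isbn[:-1]): check_sum += int(char) * (1 if i%2==0 else 3)`;
-- the try/except (ValueError, IndexError) is modelled by Option (none = raised → False).
def validate_isbn13_py (isbn : String) : Bool :=
  let body := PySem.List.slice isbn.toList none (some (-1))
  let checkSum :=
    (PySem.List.enumerate body 0).foldl
      (fun acc p =>
        acc.bind fun s =>
          (PySem.Int.ofChars? [p.2]).map fun d =>
            s + d * (if PySem.Int.mod p.1 2 = 0 then 1 else 3))
      (some 0)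
  match checkSum with
  | none => false
  | some cs =>
    match (PySem.List.pyGet? isbn.toList (-1)).bind (fun lc => PySem.Int.ofChars? [lc]) with
    | none => false
    | some cd => PySem.Int.mod (cs + cd) 10 == 0

-- ===== PORT B =====
-- sum(int(c) for c in cs), with ValueError as none
def sumDigits? (cs : List Char) : Option Int :=
  cs.foldl (fun acc c => acc.bind fun s => (PySem.Int.ofChars? [c]).map fun d => s + d) (some 0)

def validate_isbn13_py_alt (isbn : String) : Bool :=
  let body := PySem.List.slice isbn.toList none (some (-1))   -- isbn[:-1]
  let evens := (PySem.List.slice? body (some 0) none 2).getD []   -- body[0::2] (step 2 ≠ 0, never none)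
  let odds  := (PySem.List.slice? body (some 1) none 2).getD []   -- body[1::2]
  match sumDigits? evens, sumDigits? odds,
        (PySem.List.pyGet? isbn.toList (-1)).bind (fun lc => PySem.Int.ofChars? [lc]) with
  | some a, some b, some cd => PySem.Int.mod (a + 3 * b + cd) 10 == 0
  | _, _, _ => false

-- ===== PRECONDITION & SPEC =====
def Spec_validate_isbn13_py (isbn : String) (out : Bool) : Prop := out = validate_isbn13_py_alt isbn
instance (isbn : String) (out : Bool) : Decidable (Spec_validate_isbn13_py isbn out) := by unfold Spec_validate_isbn13_py; infer_instance

-- ===== CLAIM (what is proved, stated in full; the proofs are below) =====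
def Claim_equal_validate_isbn13_py : Prop := ∀ (isbn : String), Dom_validate_isbn13_py isbn → Spec_validate_isbn13_py isbn (validate_isbn13_py isbn)

-- ===== LEMMAS AND PROOFS =====

-- even-index and odd-index elements of a list
def evL {α : Type} : List α → List α
  | [] => []
  | [a] => [a]
  | a :: _ :: t => a :: evL t

def odL {α : Type} : List α → List α
  | [] => []
  | [_] => []
  | _ :: b :: t => b :: odL t

-- structural form of sumDigits? with accumulator
def sd (s : Int) : List Char → Option Int
  | [] => some s
  | c :: t =>
    match PySem.Int.ofChars? [c] with
    | none => none
    | some d => sd (s + d) t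

theorem sumDigits_foldl_none (cs : List Char) :
    cs.foldl (fun acc c => acc.bind fun s => (PySem.Int.ofChars? [c]).map fun d => s + d) none = none := by
  induction cs with
  | nil => rfl
  | cons c t ih => simpa using ih

theorem sumDigits_eq_sd (cs : List Char) : ∀ s : Int,
    cs.foldl (fun acc c => acc.bind fun s => (PySem.Int.ofChars? [c]).map fun d => s + d) (some s) = sd s cs := by
  induction cs with
  | nil => intro s; rfl
  | cons c t ih =>
    intro s
    cases h : PySem.Int.ofChars? [c] with
    | none => simp [List.foldl, h, sd, sumDigits_foldl_none]
    | some d => simp [List.foldl, h, sd, ih]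

theorem sd_shift (cs : List Char) : ∀ s : Int, sd s cs = (sd 0 cs).map (s + ·) := by
  induction cs with
  | nil => intro s; simp [sd]
  | cons c t ih =>
    intro s
    cases h : PySem.Int.ofChars? [c] with
    | none => simp [sd, h]
    | some d =>
      simp only [sd, h]
      rw [ih (s + d), ih (0 + d)]
      cases sd 0 t
      · simp
      · simp
        ring

theorem mod_two (i : Int) : PySem.Int.mod i 2 = i % 2 :=
  PySem.Int.mod_eq_emod_of_pos (by norm_num)

theorem fA_foldl_none (l : List (Int × Char)) :
    l.foldl (fun acc p => acc.bind fun s => (PySem.Int.ofChars? [p.2]).map fun d =>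
      s + d * (if PySem.Int.mod p.1 2 = 0 then 1 else 3)) none = none := by
  induction l with
  | nil => rfl
  | cons p t ih => simpa using ih

-- loop invariant: A's alternating fold over `enumerate body` = grouped even/odd digit sums
theorem loopA_eq (l : List Char) : ∀ (i s : Int),
    (PySem.List.enumerate l i).foldl
      (fun acc p => acc.bind fun s =>
        (PySem.Int.ofChars? [p.2]).map fun d =>
          s + d * (if PySem.Int.mod p.1 2 = 0 then 1 else 3)) (some s)
    = if i % 2 = 0 then
        (sd 0 (evL l)).bind fun a => (sd 0 (odL l)).map fun b => s + a + 3 * b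
      else
        (sd 0 (evL l)).bind fun a => (sd 0 (odL l)).map fun b => s + 3 * a + b := by
  induction l using evL.induct with
  | case1 => intro i s; simp [PySem.List.enumerate_nil, evL, odL, sd]
  | case2 a =>
    intro i s
    rw [PySem.List.enumerate_cons, PySem.List.enumerate_nil, List.foldl_cons, List.foldl_nil]
    cases h : PySem.Int.ofChars? [a] with
    | none =>
      simp only [Option.bind_some, Option.map_none]
      simp [evL, odL, sd, h]
    | some d =>
      rcases Int.emod_two_eq_zero_or_one i with hp | hp
      · simp [h, sd, evL, odL, hp]
        try ring
      · simp [h, sd, evL, odL, hp]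
        try ring
  | case3 a b t ih =>
    intro i s
    rw [PySem.List.enumerate_cons, PySem.List.enumerate_cons, List.foldl_cons, List.foldl_cons]
    cases ha : PySem.Int.ofChars? [a] with
    | none =>
      simp only [Option.bind_some, Option.map_none, Option.bind_none]
      rw [fA_foldl_none]
      simp only [evL, odL, sd, ha]
      split <;> rfl
    | some da =>
      cases hb : PySem.Int.ofChars? [b] with
      | none =>
        simp only [Option.bind_some, Option.map_some, Option.map_none]
        rw [fA_foldl_none]
        simp only [evL, odL, sd, ha, hb]
        cases sd (0 + da) (evL t) <;> split <;> rfl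
      | some db =>
        simp only [Option.bind_some, Option.map_some]
        rw [ih (i + 1 + 1)]
        have h2 : (i + 1 + 1) % 2 = i % 2 := by omega
        rw [h2]
        simp only [evL, odL, sd, ha, hb, zero_add]
        rcases Int.emod_two_eq_zero_or_one i with hp | hp
        · have h1 : (i + 1) % 2 = 1 := by omega
          simp only [mod_two, hp, h1, if_pos]
          simp only [if_neg (by norm_num : ¬ (1:Int) = 0)]
          rw [sd_shift (evL t) da, sd_shift (odL t) db]
          cases sd 0 (evL t) <;> cases sd 0 (odL t) <;> (simp; try ring)
        · have h1 : (i + 1) % 2 = 0 := by omega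
          simp only [mod_two, hp, h1]
          simp only [if_neg (by norm_num : ¬ (1:Int) = 0), if_pos]
          rw [sd_shift (evL t) da, sd_shift (odL t) db]
          cases sd 0 (evL t) <;> cases sd 0 (odL t) <;> (simp; try ring)

theorem fm_ev {α : Type} (l : List α) :
    List.filterMap (fun k => l[2 * k]?) (List.range ((l.length + 1) / 2)) = evL l := by
  induction l using evL.induct with
  | case1 => simp [evL]
  | case2 a => simp [evL]
  | case3 a b t ih =>
    have hc : ((a :: b :: t).length + 1) / 2 = (t.length + 1) / 2 + 1 := by
      simp [List.length_cons]; omega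
    rw [hc, List.range_succ_eq_map, List.filterMap_cons, List.filterMap_map]
    have hf : ((fun k => (a :: b :: t)[2 * k]?) ∘ (· + 1)) = (fun k => t[2 * k]?) := by
      funext k
      have h1 : 2 * (k + 1) = (2 * k) + 1 + 1 := by omega
      simp [Function.comp, h1]
    rw [hf, ih]
    rfl

theorem fm_od {α : Type} (l : List α) :
    List.filterMap (fun k => l[2 * k + 1]?) (List.range (l.length / 2)) = odL l := by
  induction l using odL.induct with
  | case1 => simp [odL]
  | case2 a => simp [odL]
  | case3 a b t ih =>
    have hc : (a :: b :: t).length / 2 = t.length / 2 + 1 := by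
      simp [List.length_cons]; omega
    rw [hc, List.range_succ_eq_map, List.filterMap_cons, List.filterMap_map]
    have hf : ((fun k => (a :: b :: t)[2 * k + 1]?) ∘ (· + 1)) = (fun k => t[2 * k + 1]?) := by
      funext k
      have h1 : 2 * (k + 1) + 1 = (2 * k + 1) + 1 + 1 := by omega
      simp [Function.comp, h1]
    rw [hf, ih]
    rfl

theorem slice_zero_two {α : Type} (l : List α) :
    PySem.List.slice? l (some 0) none 2 = some (evL l) := by
  rw [← fm_ev]
  simp only [PySem.List.slice?, PySem.List.sliceIndices]
  norm_num
  have hf : (fun k : Nat => l[(2 * (k:Int)).toNat]?) = (fun k => l[2 * k]?) := by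
    funext k
    have h1 : ((2 * (k:Int)).toNat) = 2 * k := by omega
    rw [h1]
  rw [hf]
  have hr : (if 0 < l.length then (((l.length:Int) + 2 - 1) / 2).toNat else 0) = (l.length + 1) / 2 := by
    split <;> omega
  rw [hr]

theorem slice_one_two {α : Type} (l : List α) :
    PySem.List.slice? l (some 1) none 2 = some (odL l) := by
  cases l with
  | nil => rfl
  | cons x t =>
    rw [← fm_od]
    simp only [PySem.List.slice?, PySem.List.sliceIndices]
    norm_num
    have hf : (fun k : Nat => (x :: t)[(1 + 2 * (k:Int)).toNat]?) = (fun k => t[2 * k]?) := by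
      funext k
      have h1 : ((1 + 2 * (k:Int)).toNat) = 2 * k + 1 := by omega
      rw [h1]
      simp
    rw [hf]
    have hr : (if 0 < t.length then (((t.length:Int) + 2 - 1) / 2).toNat else 0) = (t.length + 1) / 2 := by
      split <;> omega
    rw [hr]

-- ===== VERDICT (by name: the statement is the Claim_ definition above) =====
theorem validate_isbn13_py_spec : Claim_equal_validate_isbn13_py := by
  intro isbn _
  unfold Spec_validate_isbn13_py validate_isbn13_py validate_isbn13_py_alt
  simp only [slice_zero_two, slice_one_two, Option.getD_some, sumDigits?, sumDigits_eq_sd]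
  rw [loopA_eq]
  norm_num
  cases sd 0 (evL (PySem.List.slice isbn.toList none (some (-1)))) <;>
    cases sd 0 (odL (PySem.List.slice isbn.toList none (some (-1)))) <;>
    cases (PySem.List.pyGet? isbn.toList (-1)).bind (fun lc => PySem.Int.ofChars? [lc]) <;>
    simp
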